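-- pv_equiv track=rewrite | github.com/cmdlirazan/CSE-1321L-Programming-and-Problem-Solving-I-Laboratory | CSE1321L/M4 Sequence Types/Assignment4/Assignment4B.py | check_upper_lower
-- ===== SOURCE A (Python) =====
-- def check_upper_lower(password):
--     has_upper = False
--     has_lower = False
--     for char in password:
--         if char.isupper():
--             has_upper = True
--         if char.islower():
--             has_lower = True
--         if has_upper and has_lower:
--             return True
--     return False
-- ===== SOURCE B (Python) =====
-- def check_upper_lower(password):
--     return any(c.isupper() for c in password) and any(c.islower() for c in password)
-- ===== Notes on version B (the rewrite author's own statement) =====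
-- stated objective: idiomatic
-- what changed: Replaces the single interleaved flag-tracking loop with two independent short-circuiting any() scans joined by and.
import Mathlib
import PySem

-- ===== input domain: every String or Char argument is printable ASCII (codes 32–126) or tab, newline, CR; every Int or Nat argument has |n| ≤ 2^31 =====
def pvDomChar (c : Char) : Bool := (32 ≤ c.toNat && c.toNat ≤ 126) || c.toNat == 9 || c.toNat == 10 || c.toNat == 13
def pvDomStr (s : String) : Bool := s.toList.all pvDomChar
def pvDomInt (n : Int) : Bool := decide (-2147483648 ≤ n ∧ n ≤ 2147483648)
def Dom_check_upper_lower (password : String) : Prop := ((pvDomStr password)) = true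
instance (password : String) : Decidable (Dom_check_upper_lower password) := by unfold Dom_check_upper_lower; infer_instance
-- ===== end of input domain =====

-- B replaces A's single flag-tracking early-exit loop with two independent any-scans joined by &&; idiomatic, same cost.

-- ===== PORT A =====
-- A's loop: carries has_upper/has_lower flags, returns True as soon as both hold.
def checkLoopA : List Char → Bool → Bool → Bool
  | [], _, _ => false
  | c :: rest, hu, hl =>
    let hu' := if PySem.Chars.isupper c then true else hu
    let hl' := if PySem.Chars.islower c then true else hl
    if hu' && hl' then true else checkLoopA rest hu' hl'

def check_upper_lower (password : String) : Bool :=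
  checkLoopA password.toList false false

-- ===== PORT B =====
def check_upper_lower_alt (password : String) : Bool :=
  (password.toList.any PySem.Chars.isupper) && (password.toList.any PySem.Chars.islower)

-- ===== PRECONDITION & SPEC =====
def Spec_check_upper_lower (password : String) (out : Bool) : Prop := out = check_upper_lower_alt password
instance (password : String) (out : Bool) : Decidable (Spec_check_upper_lower password out) := by unfold Spec_check_upper_lower; infer_instance

-- ===== CLAIM (what is proved, stated in full; the proofs are below) =====
def Claim_equal_check_upper_lower : Prop := ∀ (password : String), Dom_check_upper_lower password → Spec_check_upper_lower password (check_upper_lower password)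

-- ===== LEMMAS AND PROOFS =====
theorem checkLoopA_eq (l : List Char) : ∀ (hu hl : Bool), (hu && hl) = false →
    checkLoopA l hu hl = ((hu || l.any PySem.Chars.isupper) && (hl || l.any PySem.Chars.islower)) := by
  induction l with
  | nil => intro hu hl h; simp [checkLoopA, h]
  | cons c rest ih =>
    intro hu hl h
    simp only [checkLoopA, List.any_cons]
    by_cases hb : ((if PySem.Chars.isupper c then true else hu) &&
        (if PySem.Chars.islower c then true else hl)) = true
    · rw [if_pos hb]
      cases hu <;> cases hl <;> revert hb h <;>
        cases hU : PySem.Chars.isupper c <;> cases hL : PySem.Chars.islower c <;> simp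
    · rw [if_neg hb, ih _ _ (by revert hb; cases hu <;> cases hl <;>
        cases PySem.Chars.isupper c <;> cases PySem.Chars.islower c <;> simp)]
      cases hu <;> cases hl <;> cases PySem.Chars.isupper c <;> cases PySem.Chars.islower c <;> simp

-- ===== VERDICT (by name: the statement is the Claim_ definition above) =====
theorem check_upper_lower_spec : Claim_equal_check_upper_lower := by
  intro password _
  unfold Spec_check_upper_lower check_upper_lower check_upper_lower_alt
  simpa using checkLoopA_eq password.toList false false rfl
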